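-- pv_equiv track=rewrite | github.com/harvy1070/harvy_project | lv1/KAKAO_NEW_ID.py | solution
-- ===== SOURCE A (Python) =====
-- def solution(new_id):
--     # 1단계(전체 소문자)
--     new_id = new_id.lower()
--
--     # 2단계(-_' 제외한 특수문자 다 제거)
--     answer = ''
--     for i in new_id:
--         if i.isalnum() or i in '-_.':
--             answer += i
--
--     # 3단계(..., .. 을 .으로 치환)
--     while '..' in answer:
--         answer = answer.replace('..', '.')
--
--     # 4단계(. 가 처음이나 끝에 위치하면 제거)
--     answer = answer[1:] if answer[0] == '.' and len(answer) > 1 else answer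
--     answer = answer[:-1] if answer[-1] == '.' else answer
--
--     # 5단계(공백이 있으면 'a'로 치환)
--     answer = 'a' if answer == '' else answer
--
--     # 6단계(16자 이상일 시 15개의 문자 제외하고 나머진 삭제
--     if len(answer) >= 16:
--         answer = answer[:15]
--         if answer[-1] == '.':
--             answer = answer[:-1]
--
--     # 7단계(2자 이하일 시 마지막 문자를 길이가 3이상 될 때까지 반복해서 붙임)
--     while len(answer) < 3:
--         answer += answer[-1]
--
--     return answer
-- ===== SOURCE B (Python) =====
-- def solution(new_id):
--     # single pass: lowercase, filter allowed chars, collapse dot-runs on the fly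
--     out = []
--     for ch in new_id.lower():
--         if ch.isalnum() or ch == '-' or ch == '_':
--             out.append(ch)
--         elif ch == '.' and (not out or out[-1] != '.'):
--             out.append('.')
--     if out and out[0] == '.':
--         out = out[1:]
--     if out and out[-1] == '.':
--         out = out[:-1]
--     s = ''.join(out) if out else 'a'
--     s = s[:15]
--     if s[-1] == '.':
--         s = s[:-1]
--     if len(s) < 3:
--         s = (s + s[-1] * 2)[:3]
--     return s
-- ===== Notes on version B (the rewrite author's own statement) =====
-- stated objective: alternative
-- what changed: Replaces the repeated whole-string dot-collapsing replace loop and string-concatenation filtering with a single left-to-right pass that filters and collapses dot runs on the fly, followed by constant-count edge fixes.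
-- crash fix: On inputs with no alphanumeric, hyphen, underscore or dot character (e.g. a lone exclamation mark or the empty string), A raises IndexError at step 4's answer[0]; B returns the letter-a fallback padded to three characters. — e.g. on solution("!"): A raises IndexError, B returns "aaa"
import Mathlib
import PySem

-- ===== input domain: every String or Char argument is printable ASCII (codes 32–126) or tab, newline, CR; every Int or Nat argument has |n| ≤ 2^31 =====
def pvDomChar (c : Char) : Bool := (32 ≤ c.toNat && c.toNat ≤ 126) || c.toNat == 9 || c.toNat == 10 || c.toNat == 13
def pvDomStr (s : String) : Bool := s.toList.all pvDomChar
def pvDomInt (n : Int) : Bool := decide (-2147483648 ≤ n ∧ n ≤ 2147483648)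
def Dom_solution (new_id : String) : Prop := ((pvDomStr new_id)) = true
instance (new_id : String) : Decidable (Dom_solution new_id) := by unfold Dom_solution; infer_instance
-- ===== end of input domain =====

-- B replaces A's repeated whole-string dot-collapsing replace passes and char-by-char
-- string concatenation with one left-to-right pass that filters and collapses dot runs
-- as it goes.

-- ===== PORT A =====
-- helper: the character test of A's filter loop (i.isalnum() or i in '-_.')
def aKeep (c : Char) : Bool := PySem.Chars.isalnum c || ['-', '_', '.'].contains c

-- termination support for A's `while '..' in answer` loop: one Python
-- replace('..','.') pass, written as plain recursion, and proofs that it is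
-- what PySem.Chars.replace computes and that it shortens the string.
def replaceDD : List Char → List Char
  | [] => []
  | [c] => [c]
  | c :: d :: t => if c = '.' ∧ d = '.' then '.' :: replaceDD t else c :: replaceDD (d :: t)
termination_by l => l.length

theorem replaceDD_go (fuel : Nat) : ∀ (l acc : List Char), l.length ≤ fuel →
    PySem.Chars.replace.go ['.', '.'] ['.'] fuel l acc = acc.reverse ++ replaceDD l := by
  induction fuel with
  | zero =>
    intro l acc h
    have : l = [] := by cases l <;> simp_all
    subst this
    simp [PySem.Chars.replace.go, replaceDD]
  | succ f ih =>
    intro l acc h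
    match l with
    | [] => simp [PySem.Chars.replace.go, replaceDD]
    | c :: t =>
      by_cases hp : (['.', '.']).isPrefixOf (c :: t) = true
      · rw [List.isPrefixOf_iff_prefix] at hp
        obtain ⟨r, hr⟩ := hp
        simp at hr
        obtain ⟨rfl, rfl⟩ := hr
        rw [PySem.Chars.replace.go]
        simp only [List.isPrefixOf_iff_prefix]
        rw [if_pos (by simp)]
        rw [ih _ _ (by simp at h ⊢; omega)]
        simp [replaceDD]
      · rw [PySem.Chars.replace.go, if_neg hp, ih _ _ (by simp at h ⊢; omega)]
        have hc : ¬(c = '.' ∧ t.head? = some '.') := by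
          rintro ⟨rfl, ht⟩
          rcases t with _ | ⟨d, t'⟩
          · simp at ht
          · simp at ht
            subst ht
            simp at hp
        rcases t with _ | ⟨d, t'⟩
        · simp [replaceDD]
        · rw [replaceDD, if_neg (by rintro ⟨rfl, rfl⟩; exact hc ⟨rfl, rfl⟩)]
          simp

theorem replace_eq_replaceDD (l : List Char) :
    PySem.Chars.replace l ['.', '.'] ['.'] = replaceDD l := by
  rw [PySem.Chars.replace, if_neg (by simp)]
  simpa using replaceDD_go l.length l [] le_rfl

-- Bool test for an adjacent pair of dots, with its bridge to `'..' in s`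
def hasDD : List Char → Bool
  | [] => false
  | [_] => false
  | c :: d :: t => decide (c = '.' ∧ d = '.') || hasDD (d :: t)
termination_by l => l.length

theorem hasDD_iff_infix (l : List Char) : hasDD l = true ↔ ['.', '.'] <:+: l := by
  induction l with
  | nil => simp [hasDD]
  | cons c t ih =>
    rcases t with _ | ⟨d, t'⟩
    · simp [hasDD]
      rintro ⟨s, u, h⟩
      rcases s with _ | ⟨x, s⟩ <;> simp_all
    · rw [List.infix_cons_iff, hasDD]
      simp only [Bool.or_eq_true, decide_eq_true_eq, ih, List.cons_prefix_cons]
      constructor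
      · rintro (⟨rfl, rfl⟩ | h)
        · exact Or.inl ⟨rfl, by simp⟩
        · exact Or.inr h
      · rintro (⟨rfl, h⟩ | h)
        · exact Or.inl ⟨rfl, h.1.symm⟩
        · exact Or.inr h

theorem isIn_eq_hasDD (l : List Char) : PySem.Chars.isIn ['.', '.'] l = hasDD l := by
  rcases h : hasDD l
  · rw [(PySem.Chars.isIn_eq_false_iff _ _).mpr]
    intro hi
    rw [← hasDD_iff_infix, h] at hi; exact absurd hi (by simp)
  · exact (PySem.Chars.isIn_iff_infix _ _).mpr ((hasDD_iff_infix l).mp h)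

theorem length_replaceDD_le (l : List Char) : (replaceDD l).length ≤ l.length := by
  fun_induction replaceDD <;> simp_all <;> omega

theorem length_replaceDD_lt (l : List Char) (h : hasDD l = true) :
    (replaceDD l).length < l.length := by
  fun_induction replaceDD with
  | case1 => simp [hasDD] at h
  | case2 => simp [hasDD] at h
  | case3 c d t hcd ih =>
    have := length_replaceDD_le t
    simp; omega
  | case4 c d t hcd ih =>
    simp [hasDD] at h
    rcases h with ⟨rfl, rfl⟩ | h
    · exact absurd ⟨rfl, rfl⟩ hcd
    · have := ih h
      simp at this ⊢; omega

-- step 3 of A: while '..' in answer: answer = answer.replace('..','.')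
def aDotLoop (l : List Char) : List Char :=
  if PySem.Chars.isIn ['.', '.'] l then aDotLoop (PySem.Chars.replace l ['.', '.'] ['.']) else l
termination_by l.length
decreasing_by
  rename_i h
  rw [replace_eq_replaceDD]
  exact length_replaceDD_lt l (by rw [← isIn_eq_hasDD]; exact h)

-- step 7 of A: while len(answer) < 3: answer += answer[-1]
def aPad (l : List Char) : List Char :=
  if l.length < 3 then
    match PySem.List.pyGet? l (-1) with
    | some c => aPad (l ++ [c])
    | none => l
  else l
termination_by 3 - l.length
decreasing_by simp [List.length_append]; omega

def solution (new_id : String) : String :=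
  let lowered := PySem.Chars.lower new_id.toList
  let ans := lowered.foldl (fun acc c => if aKeep c then acc ++ [c] else acc) []
  let ans := aDotLoop ans
  let ans := if PySem.List.pyGet? ans 0 == some '.' && decide (ans.length > 1)
             then PySem.List.slice ans (some 1) none else ans
  let ans := if PySem.List.pyGet? ans (-1) == some '.'
             then PySem.List.slice ans none (some (-1)) else ans
  let ans := if ans = [] then ['a'] else ans
  let ans := if ans.length ≥ 16 then
               let t := PySem.List.slice ans none (some 15)
               if PySem.List.pyGet? t (-1) == some '.'
               then PySem.List.slice t none (some (-1)) else t
             else ans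
  String.ofList (aPad ans)

-- ===== PORT B =====
-- helper: the character test of B's main branch (ch.isalnum() or ch == '-' or ch == '_')
def bKeep (c : Char) : Bool := PySem.Chars.isalnum c || c == '-' || c == '_'

-- B's single pass: filter and collapse dot runs while appending
def bScan (out : List Char) : List Char → List Char
  | [] => out
  | c :: t =>
    if bKeep c then bScan (out ++ [c]) t
    else if c == '.' && (out.isEmpty || !(out.getLast? == some '.')) then bScan (out ++ ['.']) t
    else bScan out t

def solution_alt (new_id : String) : String :=
  let out := bScan [] (PySem.Chars.lower new_id.toList)
  let out := if out.head? == some '.' then out.tail else out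
  let out := if out.getLast? == some '.' then out.dropLast else out
  let s := if out.isEmpty then ['a'] else out
  let s := s.take 15
  let s := if s.getLast? == some '.' then s.dropLast else s
  let s := if s.length < 3 then
             match s.getLast? with
             | some c => (s ++ [c, c]).take 3
             | none => s
           else s
  String.ofList s

-- ===== PRECONDITION & SPEC =====
-- Pre_ excludes exactly the inputs with no alphanumeric, hyphen, underscore or dot
-- character, on which A's `answer[0]` raises IndexError.
def Pre_solution (new_id : String) : Prop :=
  new_id.toList.any (fun c => aKeep (PySem.Chars.lowerChar c)) = true
instance (new_id : String) : Decidable (Pre_solution new_id) := by unfold Pre_solution; infer_instance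

def pvWitness_solution : String := "abc"

-- On inputs with no alphanumeric, hyphen, underscore or dot character A raises IndexError; B returns the letter-a fallback padded to three characters.
def Raises_solution (new_id : String) : Prop :=
  new_id.toList.all (fun c => !aKeep (PySem.Chars.lowerChar c)) = true
instance (new_id : String) : Decidable (Raises_solution new_id) := by unfold Raises_solution; infer_instance

def pvRaiseWitness_solution : String := "!"
def pvRaiseWitnessOut_solution : String := "aaa"

def Spec_solution (new_id : String) (out : String) : Prop := out = solution_alt new_id
instance (new_id : String) (out : String) : Decidable (Spec_solution new_id out) := by unfold Spec_solution; infer_instance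

-- ===== CLAIM (what is proved, stated in full; the proofs are below) =====
def Claim_equal_solution : Prop := ∀ (new_id : String), Dom_solution new_id → Pre_solution new_id → Spec_solution new_id (solution new_id)
def Claim_raises_solution : Prop := (∀ (new_id : String), Dom_solution new_id → Raises_solution new_id → ¬ Pre_solution new_id) ∧ (Dom_solution (pvRaiseWitness_solution) ∧ Raises_solution (pvRaiseWitness_solution) ∧ solution_alt (pvRaiseWitness_solution) = pvRaiseWitnessOut_solution)

-- ===== LEMMAS AND PROOFS =====

-- collapse of dot runs, tracking whether the previous kept char was a dot
def colP (b : Bool) : List Char → List Char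
  | [] => []
  | c :: t => if c = '.' then (if b then colP true t else '.' :: colP true t) else c :: colP false t

theorem colP_replaceDD (l : List Char) : ∀ b, colP b (replaceDD l) = colP b l := by
  fun_induction replaceDD with
  | case1 => intro b; rfl
  | case2 c => intro b; rfl
  | case3 c d t hcd ih =>
    obtain ⟨rfl, rfl⟩ := hcd
    intro b
    cases b <;> simp [colP, ih]
  | case4 c d t hcd ih =>
    intro b
    by_cases hc : c = '.'
    · subst hc
      have hd : ¬ d = '.' := fun h => hcd ⟨rfl, h⟩
      cases b <;> simp [colP, hd, ih]
    · simp [colP, hc, ih]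

theorem colP_of_not_hasDD (l : List Char) : ∀ b, hasDD l = false →
    (b = true → l.head? ≠ some '.') → colP b l = l := by
  induction l with
  | nil => intro b _ _; rfl
  | cons c t ih =>
    intro b hdd hb
    by_cases hc : c = '.'
    · subst hc
      have hb' : b = false := by
        cases b
        · rfl
        · exact absurd (hb rfl) (by simp)
      subst hb'
      have ht : t.head? ≠ some '.' := by
        rcases t with _ | ⟨d, t'⟩
        · simp
        · simp [hasDD] at hdd
          simp [hdd.1]
      have hdd' : hasDD t = false := by
        rcases t with _ | ⟨d, t'⟩
        · simp [hasDD]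
        · simp [hasDD] at hdd ⊢
          exact hdd.2
      simp [colP, ih true hdd' (fun _ => ht)]
    · have hdd' : hasDD t = false := by
        rcases t with _ | ⟨d, t'⟩
        · simp [hasDD]
        · simp [hasDD] at hdd ⊢
          exact hdd.2
      simp [colP, hc, ih false hdd' (by simp)]

theorem aDotLoop_eq_colP (l : List Char) : aDotLoop l = colP false l := by
  fun_induction aDotLoop with
  | case1 l h ih => rw [ih, replace_eq_replaceDD, colP_replaceDD]
  | case2 l h =>
    rw [isIn_eq_hasDD] at h
    exact (colP_of_not_hasDD l false (by simpa using h) (by simp)).symm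

theorem hasDD_colP : ∀ (l : List Char) (b : Bool),
    hasDD (colP b l) = false ∧ (b = true → (colP b l).head? ≠ some '.') := by
  intro l
  induction l with
  | nil => intro b; simp [colP, hasDD]
  | cons c t ih =>
    intro b
    by_cases hc : c = '.'
    · subst hc
      cases b
      · have hcol : colP false ('.' :: t) = '.' :: colP true t := by simp [colP]
        rw [hcol]
        refine ⟨?_, by simp⟩
        have := ih true
        rcases h : colP true t with _ | ⟨d, t'⟩
        · simp [hasDD]
        · rw [h] at this
          simp [hasDD, this.1]
          exact fun hd => absurd (by simp [hd]) (this.2 rfl)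
      · have hcol : colP true ('.' :: t) = colP true t := by simp [colP]
        rw [hcol]
        exact ih true
    · have hcol : colP b (c :: t) = c :: colP false t := by simp [colP, hc]
      rw [hcol]
      have := ih false
      refine ⟨?_, by simp [hc]⟩
      rcases h : colP false t with _ | ⟨d, t'⟩
      · simp [hasDD]
      · rw [h] at this
        simp [hasDD, this.1, hc]

theorem aKeep_of_bKeep (c : Char) (h : bKeep c = true) : aKeep c = true := by
  simp [bKeep] at h
  rcases h with (h | rfl) | rfl
  · simp [aKeep, h]
  · simp [aKeep]
  · simp [aKeep]

theorem ne_dot_of_bKeep (c : Char) (h : bKeep c = true) : c ≠ '.' := by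
  rintro rfl; exact absurd h (by decide)

theorem aKeep_eq_false (c : Char) (h : bKeep c = false) (hc : c ≠ '.') : aKeep c = false := by
  simp [bKeep] at h
  simp [aKeep, h.1.1, h.1.2, h.2, hc]

theorem bScan_eq_colP (t : List Char) : ∀ out : List Char,
    bScan out t = out ++ colP (out.getLast? == some '.') (t.filter aKeep) := by
  induction t with
  | nil => intro out; simp [bScan, colP]
  | cons c t ih =>
    intro out
    by_cases hb : bKeep c = true
    · have hc := ne_dot_of_bKeep c hb
      rw [bScan, if_pos hb, ih, List.filter_cons_of_pos (aKeep_of_bKeep c hb)]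
      simp only [List.getLast?_append, List.getLast?_singleton, colP, if_neg hc]
      simp [beq_eq_false_iff_ne.mpr hc, List.append_assoc]
    · by_cases hc : c = '.'
      · subst hc
        rw [bScan, if_neg hb, List.filter_cons_of_pos (by decide)]
        by_cases hlast : out.getLast? = some '.'
        · have hout : out ≠ [] := by rintro rfl; simp at hlast
          rw [if_neg (by simp [hlast, hout])]
          rw [ih]
          simp [hlast, colP]
        · rw [if_pos (by simp [hlast])]
          rw [ih]
          simp only [List.getLast?_append, List.getLast?_singleton, colP]
          simp [hlast, List.append_assoc]
      · rw [bScan, if_neg hb, if_neg (by simp [hc]), ih,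
            List.filter_cons_of_neg (by simp [aKeep_eq_false c (by simpa using hb) hc])]

theorem pyGet?_neg_one {α : Type} (l : List α) : PySem.List.pyGet? l (-1) = l.getLast? := by
  rcases l with _ | ⟨a, t⟩
  · simp [PySem.List.pyGet?, PySem.List.pyIdx?]
  · simp [PySem.List.pyGet?, PySem.List.pyIdx?, List.getLast?_eq_getElem?]

theorem pyGet?_zero {α : Type} (l : List α) : PySem.List.pyGet? l 0 = l.head? := by
  rcases l with _ | ⟨a, t⟩ <;> simp [PySem.List.pyGet?, PySem.List.pyIdx?]

theorem getLast?_dropLast_ne_dot (l : List Char) (h : hasDD l = false)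
    (hl : l.getLast? = some '.') : l.dropLast.getLast? ≠ some '.' := by
  intro hd
  obtain ⟨dl, rfl⟩ := List.getLast?_eq_some_iff.mp hl
  rw [List.dropLast_concat] at hd
  obtain ⟨dl', rfl⟩ := List.getLast?_eq_some_iff.mp hd
  have : hasDD ((dl' ++ ['.']) ++ ['.']) = true := by
    rw [hasDD_iff_infix]
    exact ⟨dl', [], by simp⟩
  rw [this] at h
  exact absurd h (by simp)

theorem aPad_eq (l : List Char) (hl : l ≠ []) :
    aPad l = (if l.length < 3 then
                match l.getLast? with
                | some c => (l ++ [c, c]).take 3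
                | none => l
              else l) := by
  rcases l with _ | ⟨a, _ | ⟨b, _ | ⟨c, t⟩⟩⟩
  · exact absurd rfl hl
  · simp [aPad, pyGet?_neg_one]
  · simp [aPad, pyGet?_neg_one]
  · rw [aPad, if_neg (by simp), if_neg (by simp)]

-- ===== VERDICT (by name: the statement is the Claim_ definition above) =====
theorem colP_false_ne_nil (c : Char) (t : List Char) : colP false (c :: t) ≠ [] := by
  by_cases hc : c = '.' <;> simp [colP, hc]

theorem hasDD_cons (c : Char) (t : List Char) (h : hasDD (c :: t) = false) : hasDD t = false := by
  rcases t with _ | ⟨d, t'⟩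
  · simp [hasDD]
  · simp [hasDD] at h ⊢
    exact h.2

theorem rest_eq (r : List Char) (hr : hasDD r = false) :
    (let a4 := if PySem.List.pyGet? r (-1) == some '.' then PySem.List.slice r none (some (-1)) else r
     let a5 := if a4 = [] then ['a'] else a4
     let a6 := if a5.length ≥ 16 then
                 let t := PySem.List.slice a5 none (some 15)
                 if PySem.List.pyGet? t (-1) == some '.' then PySem.List.slice t none (some (-1)) else t
               else a5
     aPad a6)
    = (let o2 := if r.getLast? == some '.' then r.dropLast else r
       let s1 := if o2.isEmpty then ['a'] else o2
       let s2 := s1.take 15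
       let s3 := if s2.getLast? == some '.' then s2.dropLast else s2
       if s3.length < 3 then
         match s3.getLast? with
         | some c => (s3 ++ [c, c]).take 3
         | none => s3
       else s3) := by
  simp only [pyGet?_neg_one, PySem.List.slice_to_neg_one, List.isEmpty_iff]
  set r2 := if (r.getLast? == some '.') = true then r.dropLast else r with hr2
  have hlast2 : r2 ≠ [] → r2.getLast? ≠ some '.' := by
    intro hne
    by_cases h : r.getLast? = some '.'
    · rw [hr2, if_pos (by simp [h])]
      exact getLast?_dropLast_ne_dot r hr h
    · rwa [hr2, if_neg (by simp [h])]
  set s5 := if r2 = [] then ['a'] else r2 with hs5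
  have h5ne : s5 ≠ [] := by
    rw [hs5]; split
    · simp
    · assumption
  have h5last : s5.getLast? ≠ some '.' := by
    rw [hs5]; split
    · simp
    · exact hlast2 (by assumption)
  have hsl : PySem.List.slice s5 none (some 15) = s5.take 15 := by
    have := PySem.List.slice_to_natCast s5 15
    simpa using this
  by_cases h16 : s5.length ≥ 16
  · rw [if_pos h16, hsl]
    refine aPad_eq _ ?_
    have hlen : (List.take 15 s5).length = 15 := by
      rw [List.length_take]; omega
    split
    · intro hemp
      have := congrArg List.length hemp
      rw [List.length_dropLast, hlen] at this
      simp at this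
    · intro hemp
      rw [hemp] at hlen
      simp at hlen
  · rw [if_neg h16]
    have htk : List.take 15 s5 = s5 := List.take_of_length_le (by omega)
    have hb5 : (s5.getLast? == some '.') = false := by simpa using h5last
    rw [htk, hb5]
    simp only [Bool.false_eq_true, if_false]
    exact aPad_eq s5 h5ne

theorem solution_spec : Claim_equal_solution := by
  intro s hDom hPre
  simp only [Spec_solution, solution, solution_alt]
  have hfold : (PySem.Chars.lower s.toList).foldl
      (fun acc c => if aKeep c then acc ++ [c] else acc) ([] : List Char)
      = (PySem.Chars.lower s.toList).filter aKeep := by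
    simpa using PySem.List.foldl_append_if aKeep id (PySem.Chars.lower s.toList) []
  rw [hfold, aDotLoop_eq_colP, bScan_eq_colP]
  simp only [List.getLast?_nil, List.nil_append]
  have hbeq : (((none : Option Char) == some '.')) = false := by decide
  rw [hbeq]
  set f := (PySem.Chars.lower s.toList).filter aKeep with hf
  have hfne : f ≠ [] := by
    simp only [Pre_solution, List.any_eq_true] at hPre
    obtain ⟨c, hc, hk⟩ := hPre
    rw [hf]
    intro hnil
    have : PySem.Chars.lowerChar c ∈ (PySem.Chars.lower s.toList).filter aKeep := by
      rw [List.mem_filter]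
      exact ⟨by simp [PySem.Chars.lower]; exact ⟨c, hc, rfl⟩, hk⟩
    rw [hnil] at this
    simp at this
  have hgDD : hasDD (colP false f) = false := (hasDD_colP f false).1
  rcases hfshape : f with _ | ⟨c0, t0⟩
  · exact absurd hfshape hfne
  · have hgne : colP false f ≠ [] := by rw [hfshape]; exact colP_false_ne_nil c0 t0
    rw [← hfshape]
    set g := colP false f with hg
    rw [pyGet?_zero]
    rcases hgshape : g with _ | ⟨c, t⟩
    · exact absurd hgshape hgne
    · have hgDD' : hasDD (c :: t) = false := by rw [← hgshape]; exact hgDD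
      by_cases hc : c = '.'
      · subst hc
        rcases t with _ | ⟨d, t'⟩
        · -- g = ['.']
          norm_num [pyGet?_neg_one, PySem.List.slice_to_neg_one, aPad_eq]
          decide
        · -- g = '.' :: d :: t'
          have hA : ((('.' :: d :: t').head? == some '.') && decide (('.' :: d :: t').length > 1)) = true := by
            simp
          have hB : ((('.' :: d :: t').head? == some '.')) = true := by simp
          rw [hA, hB, if_pos rfl, if_pos rfl, PySem.List.slice_from_one, List.tail_cons]
          exact congrArg String.ofList (rest_eq (d :: t') (hasDD_cons '.' (d :: t') hgDD'))
      · have hA : (((c :: t).head? == some '.') && decide ((c :: t).length > 1)) = false := by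
          simp [hc]
        have hB : (((c :: t).head? == some '.')) = false := by simp [hc]
        rw [hA, hB]
        simp only [Bool.false_eq_true, if_false]
        exact congrArg String.ofList (rest_eq (c :: t) hgDD')

set_option maxRecDepth 8192 in
@[simp] theorem solution_raises : Claim_raises_solution := by
  unfold Claim_raises_solution
  constructor
  · intro s _ hR hP
    simp only [Pre_solution, List.any_eq_true] at hP
    simp only [Raises_solution, List.all_eq_true] at hR
    obtain ⟨c, hc, hk⟩ := hP
    have := hR c hc
    simp [hk] at this
  · exact ⟨by decide, by decide, by decide⟩
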